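-- pv_equiv track=rewrite | github.com/ricktoews/math-toys-aws | modules/phi.py | phi_first_n
-- ===== SOURCE A (Python) =====
-- def fib(nth: int):
--     [a, b] = [1, 1]
--     for i in range(1, nth + 1):
--         result = a
--         [a, b] = [b, a+b]
--     return result
--
-- def phi_a(n):
--     if n == 1:
--         return 1
--     elif n == 2:
--         return 3
--     else:
--         return phi_a(n-2) + phi_a(n-1)
--
-- def phi_first_n(n):
--     _p = 1
--     _phi_powers = []
--     while _p <= n:
--         _a = phi_a(_p)
--         _b = fib(_p)
--         _phi_str = '(%d + %d /5) / 2' % (_a, _b)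
--         _phi_powers.append(_phi_str)
--         _p += 1
--     return _phi_powers
-- ===== SOURCE B (Python) =====
-- def phi_first_n(n):
--     # One pass: carry both recurrences (Lucas-like a,b and Fibonacci fa,fb) as running values.
--     out = []
--     a, b = 1, 3
--     fa, fb = 1, 1
--     p = 1
--     while p <= n:
--         out.append('(%d + %d /5) / 2' % (a, fa))
--         a, b = b, a + b
--         fa, fb = fb, fa + fb
--         p += 1
--     return out
-- ===== Notes on version B (the rewrite author's own statement) =====
-- stated objective: faster
-- what changed: B replaces the per-index exponential recursion phi_a(p) and the per-index fib loop by a single pass that carries both recurrences as running pairs; intended as asymptotically faster (measured: B 7.22x at n=16, A times out at n=64 where B returns).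
import Mathlib
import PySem

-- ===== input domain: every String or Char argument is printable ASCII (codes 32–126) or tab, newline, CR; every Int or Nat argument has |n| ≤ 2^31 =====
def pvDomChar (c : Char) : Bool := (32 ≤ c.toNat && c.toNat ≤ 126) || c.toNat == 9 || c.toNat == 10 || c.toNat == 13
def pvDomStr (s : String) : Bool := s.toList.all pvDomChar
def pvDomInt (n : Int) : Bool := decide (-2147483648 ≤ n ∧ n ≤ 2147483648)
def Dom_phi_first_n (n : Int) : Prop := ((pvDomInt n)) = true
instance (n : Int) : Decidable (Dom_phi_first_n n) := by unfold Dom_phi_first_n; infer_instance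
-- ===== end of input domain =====

-- B replaces A's exponential phi_a recursion + per-index fib loop by one O(n) pass carrying both recurrences as running values.

-- ===== PORT A =====
-- fib: the for-loop over range(1, nth+1) as structural recursion on the iteration count;
-- state (a, b, result). Python's 'result' is unbound when the loop runs 0 times (fib(0)
-- raises NameError) — never reached by phi_first_n, which only calls fib(p) for p ≥ 1;
-- the port seeds result with 0 there.
def fibLoop : Nat → Int × Int × Int → Int × Int × Int
  | 0, st => st
  | k + 1, (a, b, _r) => fibLoop k (b, a + b, a)

def fib (nth : Int) : Int := (fibLoop nth.toNat (1, 1, 0)).2.2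

-- phi_a: Python recurses forever (RecursionError) for n ≤ 0; the port's 'n ≤ 1' base case
-- only makes the recursion total there — for n ≥ 1 (all calls phi_first_n makes) it is exact.
def phi_a (n : Int) : Int :=
  if n ≤ 1 then 1
  else if n = 2 then 3
  else phi_a (n - 2) + phi_a (n - 1)
termination_by n.toNat
decreasing_by all_goals omega

-- the while loop of A, fuel = n + 1 - p
def phiWhileA (n p : Int) (acc : List String) : List String :=
  if p ≤ n then
    phiWhileA n (p + 1)
      (acc ++ ["(" ++ PySem.Int.toStr (phi_a p) ++ " + " ++ PySem.Int.toStr (fib p) ++ " /5) / 2"])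
  else acc
termination_by (n + 1 - p).toNat
decreasing_by omega

def phi_first_n (n : Int) : List String := phiWhileA n 1 []

-- ===== PORT B =====
-- the while loop of B: running values a = phi_a p, b = phi_a (p+1), fa = fib p, fb = fib (p+1)
def phiWhileB (n p a b fa fb : Int) (acc : List String) : List String :=
  if p ≤ n then
    phiWhileB n (p + 1) b (a + b) fb (fa + fb)
      (acc ++ ["(" ++ PySem.Int.toStr a ++ " + " ++ PySem.Int.toStr fa ++ " /5) / 2"])
  else acc
termination_by (n + 1 - p).toNat
decreasing_by omega

def phi_first_n_alt (n : Int) : List String := phiWhileB n 1 1 3 1 1 []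

-- ===== PRECONDITION & SPEC =====
def Spec_phi_first_n (n : Int) (out : List String) : Prop := out = phi_first_n_alt n
instance (n : Int) (out : List String) : Decidable (Spec_phi_first_n n out) := by unfold Spec_phi_first_n; infer_instance

-- ===== CLAIM (what is proved, stated in full; the proofs are below) =====
def Claim_equal_phi_first_n : Prop := ∀ (n : Int), Dom_phi_first_n n → Spec_phi_first_n n (phi_first_n n)

-- ===== LEMMAS AND PROOFS =====

-- Fibonacci recurrence for the loop-based fib, for p ≥ 1.
lemma fibLoop_third_add (k : Nat) : ∀ (a b r r' r'' : Int),
    (fibLoop (k + 1) (a, b, r)).2.2 + (fibLoop (k + 2) (a, b, r')).2.2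
      = (fibLoop (k + 3) (a, b, r'')).2.2 := by
  induction k with
  | zero => intro a b r r' r''; simp [fibLoop]
  | succ k ih =>
      intro a b r r' r''
      show (fibLoop (k + 1) (b, a + b, a)).2.2 + (fibLoop (k + 2) (b, a + b, a)).2.2
        = (fibLoop (k + 3) (b, a + b, a)).2.2
      exact ih b (a + b) a a a

lemma fib_rec (p : Int) (hp : 1 ≤ p) : fib p + fib (p + 1) = fib (p + 2) := by
  unfold fib
  obtain ⟨k, hk⟩ : ∃ k : Nat, p.toNat = k + 1 := ⟨p.toNat - 1, by omega⟩
  have h1 : (p + 1).toNat = k + 2 := by omega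
  have h2 : (p + 2).toNat = k + 3 := by omega
  rw [hk, h1, h2]
  exact fibLoop_third_add k 1 1 0 0 0

lemma phi_a_rec (p : Int) (hp : 1 ≤ p) : phi_a p + phi_a (p + 1) = phi_a (p + 2) := by
  conv_rhs => rw [phi_a]
  rw [if_neg (by omega), if_neg (by omega),
    (by ring : p + 2 - 2 = p), (by ring : p + 2 - 1 = p + 1)]

-- bisimulation of the two while loops
lemma while_bisim (n : Int) : ∀ (fuel : Nat) (p : Int) (acc : List String),
    (n + 1 - p).toNat = fuel → 1 ≤ p →
    phiWhileA n p acc = phiWhileB n p (phi_a p) (phi_a (p + 1)) (fib p) (fib (p + 1)) acc := by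
  intro fuel
  induction fuel with
  | zero =>
      intro p acc hf hp
      rw [phiWhileA, phiWhileB, if_neg (by omega), if_neg (by omega)]
  | succ k ih =>
      intro p acc hf hp
      by_cases h : p ≤ n
      · rw [phiWhileA, phiWhileB, if_pos h, if_pos h,
          phi_a_rec p hp, fib_rec p hp,
          (by ring : p + 2 = p + 1 + 1)]
        exact ih (p + 1) _ (by omega) (by omega)
      · rw [phiWhileA, phiWhileB, if_neg h, if_neg h]

lemma fib_one : fib 1 = 1 := by decide
lemma fib_two : fib 2 = 1 := by decide
lemma phi_a_one : phi_a 1 = 1 := by rw [phi_a]; norm_num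
lemma phi_a_two : phi_a 2 = 3 := by rw [phi_a]; norm_num

-- ===== VERDICT (by name: the statement is the Claim_ definition above) =====
theorem phi_first_n_spec : Claim_equal_phi_first_n := by
  intro n _
  unfold Spec_phi_first_n phi_first_n phi_first_n_alt
  have := while_bisim n (n + 1 - 1).toNat 1 [] rfl (by omega)
  rw [this, phi_a_one, fib_one]
  norm_num [phi_a_two, fib_two]
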